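-- pv_equiv track=rewrite | github.com/Now-Tiger/Notes | DataAnalysis/count-winning-streak.py | winning_streak
-- ===== SOURCE A (Python) =====
-- def winning_streak(player_summary: list[str]) -> int:
--     counter = 0
--     for i in range(0, len(player_summary)):
--         for j in range(i + 1, len(player_summary)):
--             if (player_summary[i] == 'W') and (player_summary[j] == 'W'):
--                 counter += 1
--             else:
--                 break
--     if counter == 1:
--         counter = 2
--     return counter
-- ===== SOURCE B (Python) =====
-- def winning_streak(player_summary: list[str]) -> int:
--     total = 0
--     streak = 0
--     for game in player_summary:
--         if game == 'W':
--             total += streak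
--             streak += 1
--         else:
--             streak = 0
--     return 2 if total == 1 else total
-- ===== Notes on version B (the rewrite author's own statement) =====
-- stated objective: faster
-- what changed: Replaced A's nested index loops (each W rescans the rest of its run) by a single pass that keeps the current streak length and adds it at every 'W', with the same final '==1 -> 2' fixup.
import Mathlib
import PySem

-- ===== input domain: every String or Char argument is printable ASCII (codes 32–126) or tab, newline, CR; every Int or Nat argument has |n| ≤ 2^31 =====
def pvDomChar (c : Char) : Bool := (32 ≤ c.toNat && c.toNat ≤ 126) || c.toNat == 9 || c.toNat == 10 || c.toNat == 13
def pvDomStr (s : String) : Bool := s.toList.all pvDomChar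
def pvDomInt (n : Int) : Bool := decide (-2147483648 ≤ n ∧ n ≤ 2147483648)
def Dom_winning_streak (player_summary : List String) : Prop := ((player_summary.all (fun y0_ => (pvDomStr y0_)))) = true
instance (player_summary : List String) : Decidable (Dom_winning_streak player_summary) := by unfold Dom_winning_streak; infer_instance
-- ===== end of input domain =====

-- B replaces A's quadratic nested index loops by one pass that adds the current streak length
-- at each 'W' (objective: faster, O(n) vs O(n^2)); same '==1 → 2' fixup, return value only.

-- ===== PORT A =====
-- inner 'for j in range(i+1, len)' loop with its break: returns the counter when it stops
def pvInnerA (s : List String) (i : Int) : List Int → Int → Int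
  | [], c => c
  | j :: js, c =>
    if PySem.List.pyGetD s i "" = "W" ∧ PySem.List.pyGetD s j "" = "W" then
      pvInnerA s i js (c + 1)
    else c

def winning_streak (player_summary : List String) : Int :=
  let counter := (PySem.List.pyRange 0 (PySem.List.len player_summary) 1).foldl
    (fun c i => pvInnerA player_summary i
      (PySem.List.pyRange (i + 1) (PySem.List.len player_summary) 1) c) 0
  if counter = 1 then 2 else counter

-- ===== PORT B =====
def winning_streak_alt (player_summary : List String) : Int :=
  let p := player_summary.foldl
    (fun (p : Int × Int) game => if game = "W" then (p.1 + p.2, p.2 + 1) else (p.1, 0)) (0, 0)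
  if p.1 = 1 then 2 else p.1

-- ===== PRECONDITION & SPEC =====
def Spec_winning_streak (player_summary : List String) (out : Int) : Prop := out = winning_streak_alt player_summary
instance (player_summary : List String) (out : Int) : Decidable (Spec_winning_streak player_summary out) := by unfold Spec_winning_streak; infer_instance

-- ===== CLAIM (what is proved, stated in full; the proofs are below) =====
def Claim_equal_winning_streak : Prop := ∀ (player_summary : List String), Dom_winning_streak player_summary → Spec_winning_streak player_summary (winning_streak player_summary)

-- ===== LEMMAS AND PROOFS =====

-- number of leading "W"s of a list
def pvWpref : List String → Int
  | [] => 0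
  | x :: xs => if x = "W" then 1 + pvWpref xs else 0

-- common reference value: for each "W", the number of consecutive "W"s after it
def pvG : List String → Int
  | [] => 0
  | x :: xs => (if x = "W" then pvWpref xs else 0) + pvG xs

theorem pvInnerA_eq (s : List String) (i : Int) : ∀ (n a : Nat) (c : Int), s.length - a ≤ n →
    pvInnerA s i (PySem.List.pyRange (a : Int) (s.length : Int) 1) c
      = c + (if PySem.List.pyGetD s i "" = "W" then pvWpref (s.drop a) else 0) := by
  intro n
  induction n with
  | zero =>
    intro a c h
    have ha : s.length ≤ a := by omega
    rw [PySem.List.pyRange_one_eq_nil (by exact_mod_cast ha), List.drop_eq_nil_of_le ha]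
    simp [pvInnerA, pvWpref]
  | succ n ih =>
    intro a c h
    by_cases ha : a < s.length
    · rw [PySem.List.pyRange_one_cons (by exact_mod_cast ha), List.drop_eq_getElem_cons ha]
      have hcast : ((a : Int) + 1) = ((a + 1 : Nat) : Int) := by push_cast; ring
      have hget : PySem.List.pyGetD s (a : Int) "" = s[a] := by
        simp [PySem.List.pyGetD_natCast, List.getD_eq_getElem?_getD, ha]
      show pvInnerA s i (_ :: _) c = _
      rw [pvInnerA, hget, hcast, ih (a + 1) (c + 1) (by omega)]
      by_cases hi : PySem.List.pyGetD s i "" = "W"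
      · by_cases hw : s[a] = "W" <;> · simp [pvWpref, hi, hw]; try ring
      · simp [hi]
    · have ha' : s.length ≤ a := by omega
      rw [PySem.List.pyRange_one_eq_nil (by exact_mod_cast ha'), List.drop_eq_nil_of_le ha']
      simp [pvInnerA, pvWpref]

theorem pvOuter_eq (s : List String) : ∀ (n a : Nat) (c : Int), s.length - a ≤ n →
    (PySem.List.pyRange (a : Int) (s.length : Int) 1).foldl
      (fun c i => pvInnerA s i (PySem.List.pyRange (i + 1) (s.length : Int) 1) c) c
      = c + pvG (s.drop a) := by
  intro n
  induction n with
  | zero =>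
    intro a c h
    have ha : s.length ≤ a := by omega
    rw [PySem.List.pyRange_one_eq_nil (by exact_mod_cast ha), List.drop_eq_nil_of_le ha]
    simp [pvG]
  | succ n ih =>
    intro a c h
    by_cases ha : a < s.length
    · rw [PySem.List.pyRange_one_cons (by exact_mod_cast ha)]
      have hcast : ((a : Int) + 1) = ((a + 1 : Nat) : Int) := by push_cast; ring
      rw [List.foldl_cons]
      have hin := pvInnerA_eq s (a : Int) (s.length) (a + 1) c (by omega)
      rw [hcast, hin, ih (a + 1) _ (by omega)]
      have hget : PySem.List.pyGetD s (a : Int) "" = s[a] := by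
        simp [PySem.List.pyGetD_natCast, List.getD_eq_getElem?_getD, ha]
      rw [List.drop_eq_getElem_cons ha, hget]
      show _ = c + pvG (_ :: _)
      rw [pvG]
      ring
    · have ha' : s.length ≤ a := by omega
      rw [PySem.List.pyRange_one_eq_nil (by exact_mod_cast ha'), List.drop_eq_nil_of_le ha']
      simp [pvG]

theorem pvB_eq (s : List String) : ∀ (t r : Int),
    (s.foldl (fun (p : Int × Int) game =>
        if game = "W" then (p.1 + p.2, p.2 + 1) else (p.1, 0)) (t, r)).1
      = t + pvG s + r * pvWpref s := by
  induction s with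
  | nil => intro t r; simp [pvG, pvWpref]
  | cons x xs ih =>
    intro t r
    by_cases hx : x = "W" <;> simp only [List.foldl_cons, hx, if_pos, if_neg, ite_true,
      ite_false, ih] <;> simp [pvG, pvWpref, hx] <;> ring

-- ===== VERDICT (by name: the statement is the Claim_ definition above) =====
theorem winning_streak_spec : Claim_equal_winning_streak := by
  intro s _
  unfold Spec_winning_streak winning_streak winning_streak_alt
  have hA := pvOuter_eq s s.length 0 0 (by omega)
  have hB := pvB_eq s 0 0
  simp only [PySem.List.len_eq, Nat.cast_zero] at hA ⊢
  rw [hA, hB]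
  simp
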